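-- pv_equiv track=rewrite | github.com/hareshaprajapati/langgraph-agentic-ai | V1_0/Siko_Core_Single.py | _recency_bands
-- ===== SOURCE A (Python) =====
-- def _recency_bands(recency_gap):
--     bands = {}
--     for n, g in recency_gap.items():
--         if g <= 2:
--             bands[n] = "very_recent"
--         elif g <= 6:
--             bands[n] = "short"
--         elif g <= 15:
--             bands[n] = "medium"
--         else:
--             bands[n] = "long"
--     return bands
-- ===== SOURCE B (Python) =====
-- def _recency_bands(recency_gap):
--     # Staged refinement: start everything at "long", then successively
--     # overwrite with tighter bands in descending threshold order.
--     bands = {n: "long" for n in recency_gap}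
--     for bound, label in ((15, "medium"), (6, "short"), (2, "very_recent")):
--         for n, g in recency_gap.items():
--             if g <= bound:
--                 bands[n] = label
--     return bands
-- ===== Notes on version B (the rewrite author's own statement) =====
-- stated objective: alternative
-- what changed: Replaces the per-element if/elif classification with staged refinement: one pass initialises every key to 'long', then three further passes in descending threshold order overwrite entries whose gap is within the bound; Pre_ excludes association lists with duplicate keys, which cannot arise from the Python dict argument.
import Mathlib
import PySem

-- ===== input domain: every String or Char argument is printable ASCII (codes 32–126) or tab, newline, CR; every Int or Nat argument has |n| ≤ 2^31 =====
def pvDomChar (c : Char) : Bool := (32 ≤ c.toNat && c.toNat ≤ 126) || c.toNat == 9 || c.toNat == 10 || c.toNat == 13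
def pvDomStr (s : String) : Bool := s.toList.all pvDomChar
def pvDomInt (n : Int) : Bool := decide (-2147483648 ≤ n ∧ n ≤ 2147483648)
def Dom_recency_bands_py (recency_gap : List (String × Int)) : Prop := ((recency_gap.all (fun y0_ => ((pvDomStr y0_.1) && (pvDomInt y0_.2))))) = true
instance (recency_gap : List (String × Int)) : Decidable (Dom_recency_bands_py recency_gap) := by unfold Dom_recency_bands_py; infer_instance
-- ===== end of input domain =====

-- B replaces the per-element if/elif chain by staged refinement: initialise every key to "long",
-- then three further whole-list passes in descending threshold order overwrite tighter bands (alternative decomposition; same cost).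

-- ===== PORT A =====
def recency_bands_py (recency_gap : List (String × Int)) : List (String × String) :=
  (recency_gap.foldl
    (fun bands p =>
      if p.2 ≤ 2 then bands.insert p.1 "very_recent"
      else if p.2 ≤ 6 then bands.insert p.1 "short"
      else if p.2 ≤ 15 then bands.insert p.1 "medium"
      else bands.insert p.1 "long")
    PySem.Dict.empty).items

-- ===== PORT B =====
def recency_bands_py_alt (recency_gap : List (String × Int)) : List (String × String) :=
  (([((15 : Int), "medium"), (6, "short"), (2, "very_recent")] : List (Int × String)).foldl
      (fun bands bl =>
        recency_gap.foldl (fun d p => if p.2 ≤ bl.1 then d.insert p.1 bl.2 else d) bands)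
      (recency_gap.foldl (fun d p => d.insert p.1 "long") PySem.Dict.empty)).items

-- ===== PRECONDITION & SPEC =====
-- Pre_ excludes association lists with duplicate keys: the Python argument is a dict, whose keys
-- are necessarily distinct, so such lists cannot arise from a Python input.
def Pre_recency_bands_py (recency_gap : List (String × Int)) : Prop :=
  (recency_gap.map Prod.fst).Nodup
instance (recency_gap : List (String × Int)) : Decidable (Pre_recency_bands_py recency_gap) := by
  unfold Pre_recency_bands_py; infer_instance

def pvWitness_recency_bands_py : (List (String × Int)) := [("a", 1), ("b", 7)]

def Spec_recency_bands_py (recency_gap : List (String × Int)) (out : List (String × String)) : Prop := out = recency_bands_py_alt recency_gap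
instance (recency_gap : List (String × Int)) (out : List (String × String)) : Decidable (Spec_recency_bands_py recency_gap out) := by unfold Spec_recency_bands_py; infer_instance

-- ===== CLAIM (what is proved, stated in full; the proofs are below) =====
def Claim_equal_recency_bands_py : Prop := ∀ (recency_gap : List (String × Int)), Dom_recency_bands_py recency_gap → Pre_recency_bands_py recency_gap → Spec_recency_bands_py recency_gap (recency_bands_py recency_gap)

-- ===== LEMMAS AND PROOFS =====

-- A's final label for a gap g
def pvLabel (g : Int) : String :=
  if g ≤ 2 then "very_recent" else if g ≤ 6 then "short" else if g ≤ 15 then "medium" else "long"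

-- One refinement pass over a dict that already holds every key of rg (in rg's order, after `pre`)
-- overwrites in place exactly the entries whose gap satisfies the bound.
theorem pv_pass_items (cond : Int → Prop) [DecidablePred cond] (L : String)
    (v : String × Int → String) :
    ∀ (rg : List (String × Int)) (d : PySem.Dict String String) (pre : List (String × String)),
    d.items = pre ++ rg.map (fun p => (p.1, v p)) →
    (pre.map Prod.fst ++ rg.map Prod.fst).Nodup →
    (rg.foldl (fun d p => if cond p.2 then d.insert p.1 L else d) d).items
      = pre ++ rg.map (fun p => (p.1, if cond p.2 then L else v p)) := by
  intro rg
  induction rg with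
  | nil => intro d pre h _; simpa using h
  | cons p rest ih =>
    intro d pre h hnd
    simp only [List.foldl_cons]
    by_cases hc : cond p.2
    · -- overwrite-in-place branch
      have hmem : (p.1, v p) ∈ d.items := by
        rw [h]; exact List.mem_append_right _ (by simp)
      have hcontains : d.contains p.1 = true := by
        rw [PySem.Dict.contains_iff_mem_keys]
        simp only [PySem.Dict.keys]
        exact List.mem_map.mpr ⟨(p.1, v p), hmem, rfl⟩
      have hitems := PySem.Dict.items_insert_of_contains d (k := p.1) L hcontains
      -- keys distinct from p.1
      have hnd' := hnd
      rw [List.nodup_append] at hnd'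
      obtain ⟨hpre, hrg, hdisj⟩ := hnd'
      have hpreK : ∀ q ∈ pre, q.1 ≠ p.1 := fun q hq =>
        hdisj q.1 (List.mem_map_of_mem hq) p.1 (by simp)
      have hrestK : ∀ q ∈ rest, q.1 ≠ p.1 := by
        intro q hq he
        rw [List.map_cons, List.nodup_cons] at hrg
        exact hrg.1 (he ▸ List.mem_map_of_mem hq)
      have hitems2 : (d.insert p.1 L).items = pre ++ (p.1, L) :: rest.map (fun q => (q.1, v q)) := by
        rw [hitems, h]
        simp only [List.map_append, List.map_cons, List.map_map]
        congr 1
        · have hid : ∀ q ∈ pre, (if (q.1 == p.1) = true then (p.1, L) else q) = id q := by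
            intro q hq
            rw [if_neg (by simpa using hpreK q hq)]
            rfl
          rw [List.map_congr_left hid, List.map_id]
        · congr 1
          · simp
          · refine List.map_congr_left (fun q hq => ?_)
            simp only [Function.comp_apply]
            rw [if_neg (by simpa using hrestK q hq)]
      rw [if_pos hc]
      have := ih (d.insert p.1 L) (pre ++ [(p.1, L)])
        (by rw [hitems2]; simp)
        (by simpa [List.append_assoc] using hnd)
      rw [this]
      simp [if_pos hc]
    · -- untouched branch
      rw [if_neg hc]
      have := ih d (pre ++ [(p.1, v p)])
        (by rw [h]; simp)
        (by simpa [List.append_assoc] using hnd)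
      rw [this]
      simp [if_neg hc]

-- A's fold builds exactly the per-element labels of pvLabel, over fresh distinct keys.
theorem pv_A_items (rg : List (String × Int)) (hnd : (rg.map Prod.fst).Nodup) :
    recency_bands_py rg = rg.map (fun p => (p.1, pvLabel p.2)) := by
  unfold recency_bands_py
  have hfun : (fun (bands : PySem.Dict String String) (p : String × Int) =>
      if p.2 ≤ 2 then bands.insert p.1 "very_recent"
      else if p.2 ≤ 6 then bands.insert p.1 "short"
      else if p.2 ≤ 15 then bands.insert p.1 "medium"
      else bands.insert p.1 "long")
      = fun bands p => bands.insert p.1 (pvLabel p.2) := by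
    funext bands p
    unfold pvLabel
    split_ifs <;> rfl
  rw [hfun]
  have hfresh := PySem.Dict.items_foldl_insert_fresh rg Prod.fst (fun p => pvLabel p.2)
      (PySem.Dict.empty : PySem.Dict String String) (fun a _ => PySem.Dict.contains_empty a.1) hnd
  simpa using hfresh

theorem pv_B_items (rg : List (String × Int)) (hnd : (rg.map Prod.fst).Nodup) :
    recency_bands_py_alt rg = rg.map (fun p => (p.1, pvLabel p.2)) := by
  unfold recency_bands_py_alt
  simp only [List.foldl_cons, List.foldl_nil]
  have h0 : (rg.foldl (fun d p => d.insert p.1 "long") PySem.Dict.empty).items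
      = [] ++ rg.map (fun p => (p.1, (fun _ => "long") p)) := by
    have hfresh := PySem.Dict.items_foldl_insert_fresh rg Prod.fst (fun _ => "long")
        (PySem.Dict.empty : PySem.Dict String String) (fun a _ => PySem.Dict.contains_empty a.1) hnd
    simpa using hfresh
  have h1 := pv_pass_items (fun g => g ≤ 15) "medium" (fun _ => "long") rg _ [] h0 (by simpa using hnd)
  have h2 := pv_pass_items (fun g => g ≤ 6) "short"
      (fun p => if p.2 ≤ 15 then "medium" else "long") rg _ [] (by simpa using h1) (by simpa using hnd)
  have h3 := pv_pass_items (fun g => g ≤ 2) "very_recent"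
      (fun p => if p.2 ≤ 6 then "short" else if p.2 ≤ 15 then "medium" else "long") rg _ []
      (by simpa using h2) (by simpa using hnd)
  simpa [pvLabel] using h3

-- ===== VERDICT (by name: the statement is the Claim_ definition above) =====
theorem recency_bands_py_spec : Claim_equal_recency_bands_py := by
  intro rg _ hpre
  unfold Spec_recency_bands_py
  rw [pv_A_items rg hpre, pv_B_items rg hpre]
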